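-- pv_equiv track=rewrite | github.com/Dipakbank/C-_codes_all | ass.py | inTwoSetsNotInThird
-- ===== SOURCE A (Python) =====
-- def inTwoSetsNotInThird(groupA, groupB, groupC):
--     temp = []
--     for i in groupA:
--         if i in groupB:
--             temp.append(i)
--     for i in groupC:
--         if i in temp:
--             temp.remove(i)
--     return temp
-- ===== SOURCE B (Python) =====
-- def inTwoSetsNotInThird(groupA, groupB, groupC):
--     bset = set(groupB)
--     budget = {}
--     for i in groupC:
--         budget[i] = budget.get(i, 0) + 1
--     result = []
--     for i in groupA:
--         if i in bset:
--             if budget.get(i, 0) > 0: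
--                 budget[i] = budget[i] - 1
--             else:
--                 result.append(i)
--     return result
-- ===== Notes on version B (the rewrite author's own statement) =====
-- stated objective: faster
-- what changed: Replaces A's two quadratic passes (membership scan of groupB per element, then repeated list.remove scans over temp for groupC) by one pass over groupA using a precomputed set of groupB and a removal-budget counter of groupC.
import Mathlib
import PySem

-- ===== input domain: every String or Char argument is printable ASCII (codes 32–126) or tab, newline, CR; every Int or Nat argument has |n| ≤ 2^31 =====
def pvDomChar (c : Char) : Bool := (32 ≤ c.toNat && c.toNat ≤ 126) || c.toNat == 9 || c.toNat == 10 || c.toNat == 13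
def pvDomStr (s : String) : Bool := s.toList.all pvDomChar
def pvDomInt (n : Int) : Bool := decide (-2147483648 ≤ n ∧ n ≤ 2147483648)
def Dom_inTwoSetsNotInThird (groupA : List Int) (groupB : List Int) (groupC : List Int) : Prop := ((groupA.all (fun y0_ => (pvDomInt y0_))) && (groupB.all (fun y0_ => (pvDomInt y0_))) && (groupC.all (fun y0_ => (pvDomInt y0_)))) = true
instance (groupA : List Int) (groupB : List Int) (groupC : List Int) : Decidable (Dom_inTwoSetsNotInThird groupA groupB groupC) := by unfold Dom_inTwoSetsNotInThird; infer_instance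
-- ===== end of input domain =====

-- B replaces A's two quadratic passes by one linear pass over groupA with a set of groupB
-- and a removal-budget counter of groupC (objective: faster).

-- ===== PORT A =====
def inTwoSetsNotInThird (groupA : List Int) (groupB : List Int) (groupC : List Int) : List Int :=
  let temp := groupA.foldl (fun t i => if groupB.contains i then t ++ [i] else t) []
  groupC.foldl (fun t i => if t.contains i then (PySem.List.remove? t i).getD t else t) temp

-- ===== PORT B =====
def inTwoSetsNotInThird_alt (groupA : List Int) (groupB : List Int) (groupC : List Int) : List Int :=
  let bset : PySem.Set Int := PySem.Set.ofList groupB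
  let budget : PySem.Dict Int Int :=
    groupC.foldl (fun d i => d.insert i (d.getD i 0 + 1)) PySem.Dict.empty
  (groupA.foldl (fun (st : PySem.Dict Int Int × List Int) i =>
      if PySem.Set.contains bset i then
        if st.1.getD i 0 > 0 then (st.1.insert i (st.1.getD i 0 - 1), st.2)
        else (st.1, st.2 ++ [i])
      else st) (budget, [])).2

-- ===== PRECONDITION & SPEC =====
def Spec_inTwoSetsNotInThird (groupA : List Int) (groupB : List Int) (groupC : List Int) (out : List Int) : Prop := out = inTwoSetsNotInThird_alt groupA groupB groupC
instance (groupA : List Int) (groupB : List Int) (groupC : List Int) (out : List Int) : Decidable (Spec_inTwoSetsNotInThird groupA groupB groupC out) := by unfold Spec_inTwoSetsNotInThird; infer_instance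

-- ===== CLAIM (what is proved, stated in full; the proofs are below) =====
def Claim_equal_inTwoSetsNotInThird : Prop := ∀ (groupA : List Int) (groupB : List Int) (groupC : List Int), Dom_inTwoSetsNotInThird groupA groupB groupC → Spec_inTwoSetsNotInThird groupA groupB groupC (inTwoSetsNotInThird groupA groupB groupC)

-- ===== LEMMAS AND PROOFS =====

-- Reference function: one pass over the list, skipping elements that fail p or
-- still have removal budget left in C.
def pvSkip (p : Int → Bool) : List Int → List Int → List Int
  | _, [] => []
  | C, x :: xs =>
    if p x then
      (if x ∈ C then pvSkip p (C.erase x) xs else x :: pvSkip p C xs)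
    else pvSkip p C xs

-- A's second loop is List.diff.
theorem pv_foldl_erase_eq_diff (C : List Int) :
    ∀ t : List Int,
      C.foldl (fun t i => if t.contains i then (PySem.List.remove? t i).getD t else t) t
        = t.diff C := by
  induction C with
  | nil => intro t; rfl
  | cons c C ih =>
    intro t
    by_cases h : c ∈ t
    · rw [List.foldl_cons, if_pos (by simpa [List.contains_eq_mem] using h),
        PySem.List.remove?_eq_some_erase t c h, Option.getD_some, ih, List.diff_cons]
    · rw [List.foldl_cons, if_neg (by simpa [List.contains_eq_mem] using h), ih,
        List.diff_cons, List.erase_of_not_mem h]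

-- The skip reference computes filter-then-diff.
theorem pv_skip_eq_filter_diff (p : Int → Bool) :
    ∀ (l C : List Int), pvSkip p C l = (l.filter p).diff C := by
  intro l
  induction l with
  | nil => intro C; simp [pvSkip]
  | cons x xs ih =>
    intro C
    by_cases hp : p x
    · by_cases hc : x ∈ C
      · simp [pvSkip, hp, hc, ih, List.cons_diff]
      · simp [pvSkip, hp, hc, ih, List.cons_diff]
    · simp [pvSkip, hp, ih]

-- B's single pass computes the skip reference, given that the dict holds the counts of C.
theorem pv_foldl_budget (p : Int → Bool) :
    ∀ (l C : List Int) (d : PySem.Dict Int Int) (acc : List Int),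
      (∀ v : Int, d.getD v 0 = (C.count v : Int)) →
      (l.foldl (fun (st : PySem.Dict Int Int × List Int) i =>
          if p i then
            if st.1.getD i 0 > 0 then (st.1.insert i (st.1.getD i 0 - 1), st.2)
            else (st.1, st.2 ++ [i])
          else st) (d, acc)).2
        = acc ++ pvSkip p C l := by
  intro l
  induction l with
  | nil => intro C d acc _; simp [pvSkip]
  | cons x xs ih =>
    intro C d acc hd
    by_cases hp : p x
    · by_cases hc : x ∈ C
      · have hcount : 0 < List.count x C := List.count_pos_iff.mpr hc
        have hpos : d.getD x 0 > 0 := by rw [hd x]; exact_mod_cast hcount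
        have hinv : ∀ v : Int,
            (d.insert x (d.getD x 0 - 1)).getD v 0 = ((C.erase x).count v : Int) := by
          intro v
          rw [PySem.Dict.getD_insert]
          by_cases hv : v = x
          · subst hv
            rw [if_pos rfl, hd _, List.count_erase_self]
            omega
          · rw [if_neg hv, hd v, List.count_erase_of_ne hv]
        simp only [List.foldl_cons, if_pos hp, if_pos hpos]
        rw [ih (C.erase x) _ acc hinv]
        simp [pvSkip, hp, hc]
      · have hzero : d.getD x 0 = 0 := by
          rw [hd x, List.count_eq_zero_of_not_mem hc]; rfl
        have hnpos : ¬ d.getD x 0 > 0 := by omega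
        simp only [List.foldl_cons, if_pos hp, if_neg hnpos]
        rw [ih C d (acc ++ [x]) hd]
        simp [pvSkip, hp, hc]
    · simp only [List.foldl_cons, if_neg hp]
      rw [ih C d acc hd]
      simp [pvSkip, hp]

-- The two membership tests agree.
theorem pv_contains_ofList (B : List Int) (x : Int) :
    PySem.Set.contains (PySem.Set.ofList B) x = B.contains x := by
  simp [PySem.Set.contains, List.contains_eq_mem, PySem.Set.mem_ofList]

-- ===== VERDICT (by name: the statement is the Claim_ definition above) =====
theorem inTwoSetsNotInThird_spec : Claim_equal_inTwoSetsNotInThird := by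
  intro groupA groupB groupC _
  unfold Spec_inTwoSetsNotInThird inTwoSetsNotInThird inTwoSetsNotInThird_alt
  have hbudget : ∀ v : Int,
      (groupC.foldl (fun d i => d.insert i (d.getD i 0 + 1)) PySem.Dict.empty).getD v 0
        = (groupC.count v : Int) := by
    intro v
    rw [PySem.Dict.foldl_insert_getD_add_one_eq_counter, PySem.Dict.getD_counter]
  rw [pv_foldl_erase_eq_diff, PySem.List.foldl_append_if_eq_filter,
    pv_foldl_budget _ groupA groupC _ [] hbudget, pv_skip_eq_filter_diff]
  simp only [List.nil_append]
  congr 1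
  apply List.filter_congr
  intro x _
  rw [pv_contains_ofList]
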